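-- pv_equiv track=rewrite | github.com/shmila/FL2-git-exercise | ID3.py | get_subset_examples
-- ===== SOURCE A (Python) =====
-- def get_labels(examples,target_attr):
--     labels={}
--     for ex in examples:
--         val = ex[target_attr]
--         if val in labels:
--             labels[val] += 1
--         else:
--             labels[val] = 1
--     return labels
--
-- def get_subset_examples(examples,attr):
--     attr_vals = get_labels(examples,attr)
--     relevant_examples = {}
--     for val in attr_vals:
--         relevant_examples[val] = []
--     for ex in examples:
--         val = ex[attr]
--         relevant_examples[val].append(ex)
--     return relevant_examples
-- ===== SOURCE B (Python) =====
-- def get_subset_examples(examples, attr):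
--     keys = dict.fromkeys(ex[attr] for ex in examples)
--     return {k: [ex for ex in examples if ex[attr] == k] for k in keys}
-- ===== Notes on version B (the rewrite author's own statement) =====
-- stated objective: alternative
-- what changed: Instead of A's grouping passes (count dict, key-initialisation, incremental appends into a dict of lists), B first dedups the attribute values in first-appearance order and then builds each group by an independent per-key filter over the examples.
import Mathlib
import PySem

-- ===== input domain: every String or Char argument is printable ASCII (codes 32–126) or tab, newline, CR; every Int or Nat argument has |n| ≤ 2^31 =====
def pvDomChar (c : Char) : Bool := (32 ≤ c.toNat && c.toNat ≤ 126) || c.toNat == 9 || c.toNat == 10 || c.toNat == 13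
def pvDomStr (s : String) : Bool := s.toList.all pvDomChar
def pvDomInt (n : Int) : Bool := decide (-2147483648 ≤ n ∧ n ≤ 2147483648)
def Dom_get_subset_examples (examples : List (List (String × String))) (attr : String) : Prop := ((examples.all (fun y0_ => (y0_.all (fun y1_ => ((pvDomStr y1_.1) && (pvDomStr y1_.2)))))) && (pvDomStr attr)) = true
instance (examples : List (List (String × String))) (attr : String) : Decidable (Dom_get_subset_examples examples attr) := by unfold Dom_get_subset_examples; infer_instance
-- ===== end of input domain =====

-- B dedups the attribute values (first appearance order) and builds each group by an
-- independent per-key filter, instead of A's count/key-init/append grouping passes; objective: alternative.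

-- ex[attr] for the dict-as-assoc-list ex: first matching pair; Pre_ guarantees the key is
-- present, so the "" default is never reached on admitted inputs (Python raises KeyError there).
def pvDget (ex : List (String × String)) (attr : String) : String :=
  ((ex.find? (fun p => p.1 == attr)).map (·.2)).getD ""

-- ===== PORT A =====
def get_labels (examples : List (List (String × String))) (target_attr : String) : PySem.Dict String Int :=
  examples.foldl (fun labels ex =>
    let val := pvDget ex target_attr
    if labels.contains val then labels.insert val (labels.getD val 0 + 1)
    else labels.insert val 1) PySem.Dict.empty

def get_subset_examples (examples : List (List (String × String))) (attr : String) : List (String × List (List (String × String))) :=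
  let attr_vals := get_labels examples attr
  let relevant0 := attr_vals.keys.foldl (fun d val => d.insert val []) PySem.Dict.empty
  let relevant := examples.foldl (fun d ex =>
    let val := pvDget ex attr
    d.modify val [] (· ++ [ex])) relevant0
  relevant.items

-- ===== PORT B =====
-- dict.fromkeys(generator) = ordered dedup (PySem.List.dedup); the dict comprehension over these
-- (already distinct) keys is the association list in the same order; the list comprehension is a filter.
def get_subset_examples_alt (examples : List (List (String × String))) (attr : String) : List (String × List (List (String × String))) :=
  let keys := PySem.List.dedup (examples.map (fun ex => pvDget ex attr))
  keys.map (fun k => (k, examples.filter (fun ex => pvDget ex attr == k)))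

-- ===== PRECONDITION & SPEC =====
-- Pre_ excludes inputs where some example lacks the key attr: Python A raises KeyError there.
def Pre_get_subset_examples (examples : List (List (String × String))) (attr : String) : Prop :=
  (examples.all (fun ex => ex.any (fun p => p.1 == attr))) = true
instance (examples : List (List (String × String))) (attr : String) : Decidable (Pre_get_subset_examples examples attr) := by unfold Pre_get_subset_examples; infer_instance
def pvWitness_get_subset_examples : (List (List (String × String))) × String :=
  ([[("a", "1"), ("b", "x")], [("a", "2")], [("a", "1")]], "a")

def Spec_get_subset_examples (examples : List (List (String × String))) (attr : String) (out : List (String × List (List (String × String)))) : Prop := out = get_subset_examples_alt examples attr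
instance (examples : List (List (String × String))) (attr : String) (out : List (String × List (List (String × String)))) : Decidable (Spec_get_subset_examples examples attr out) := by unfold Spec_get_subset_examples; infer_instance

-- ===== CLAIM (what is proved, stated in full; the proofs are below) =====
def Claim_equal_get_subset_examples : Prop := ∀ (examples : List (List (String × String))) (attr : String), Dom_get_subset_examples examples attr → Pre_get_subset_examples examples attr → Spec_get_subset_examples examples attr (get_subset_examples examples attr)

-- ===== LEMMAS AND PROOFS =====

-- the modify-append loop, over mapped pairs
theorem pvFold_pairs (examples : List (List (String × String))) (attr : String)
    (d : PySem.Dict String (List (List (String × String)))) :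
    examples.foldl (fun d ex => d.modify (pvDget ex attr) [] (· ++ [ex])) d
      = (examples.map (fun ex => (pvDget ex attr, ex))).foldl
          (fun d p => d.modify p.1 [] (· ++ [p.2])) d := by
  rw [List.foldl_map]

theorem pvGetD_final (examples : List (List (String × String))) (attr : String)
    (d : PySem.Dict String (List (List (String × String)))) (c : String) :
    (examples.foldl (fun d ex => d.modify (pvDget ex attr) [] (· ++ [ex])) d).getD c []
      = d.getD c [] ++ (examples.filter (fun ex => pvDget ex attr == c)) := by
  rw [pvFold_pairs, PySem.Dict.getD_foldl_modify_append]
  congr 1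
  rw [List.filter_map]
  rw [List.map_map]
  simp [Function.comp_def]

theorem pvKeys_labels (examples : List (List (String × String))) (attr : String) :
    (get_labels examples attr).keys
      = PySem.Set.ofList (examples.map (fun ex => pvDget ex attr)) := by
  unfold get_labels
  have h : (fun (labels : PySem.Dict String Int) ex =>
      let val := pvDget ex attr
      if labels.contains val then labels.insert val (labels.getD val 0 + 1)
      else labels.insert val 1)
    = (fun labels ex => labels.insert (pvDget ex attr)
        (if labels.contains (pvDget ex attr) then labels.getD (pvDget ex attr) 0 + 1 else 1)) := by
    funext labels ex
    by_cases hc : labels.contains (pvDget ex attr) <;> simp [hc]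
  rw [h, PySem.Dict.keys_foldl_insert_key]
  simp [PySem.Dict.keys_empty, PySem.Set.update, PySem.Set.ofList_eq_foldl]

theorem pvUpdate_of_subset {α : Type} [DecidableEq α] (xs : List α) (s : PySem.Set α)
    (h : ∀ x ∈ xs, x ∈ s) : PySem.Set.update s xs = s := by
  induction xs generalizing s with
  | nil => rfl
  | cons x xs ih =>
      have hx : PySem.Set.add s x = s := by
        simp [PySem.Set.add, PySem.Set.contains, h x (by simp)]
      simp only [PySem.Set.update, List.foldl_cons]
      rw [show xs.foldl PySem.Set.add (PySem.Set.add s x) = PySem.Set.update (PySem.Set.add s x) xs from rfl]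
      rw [hx]
      exact ih s (fun y hy => h y (by simp [hy]))

-- ===== VERDICT (by name: the statement is the Claim_ definition above) =====
theorem get_subset_examples_spec : Claim_equal_get_subset_examples := by
  intro examples attr _ _
  unfold Spec_get_subset_examples get_subset_examples get_subset_examples_alt
  set m := examples.map (fun ex => pvDget ex attr) with hm
  set L := get_labels examples attr with hL
  have hLkeys : L.keys = PySem.Set.ofList m := pvKeys_labels examples attr
  have hLnodup : L.keys.Nodup := by
    rw [hLkeys]; exact PySem.Set.nodup_ofList m
  set r0 := L.keys.foldl (fun d val => d.insert val ([] : List (List (String × String)))) PySem.Dict.empty with hr0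
  have hr0items : r0.items = L.keys.map (fun k => (k, ([] : List (List (String × String))))) := by
    have h := PySem.Dict.items_foldl_insert_fresh L.keys (fun x => x)
      (fun _ => ([] : List (List (String × String)))) PySem.Dict.empty
      (by intro a _; simp [PySem.Dict.contains_empty]) (by simpa using hLnodup)
    simpa using h
  have hr0keys : r0.keys = L.keys := by
    simp only [PySem.Dict.keys, hr0items, List.map_map]
    simp
  have hr0nodup : r0.keys.Nodup := hr0keys ▸ hLnodup
  have hr0getD : ∀ c, r0.getD c [] = [] := by
    intro c
    by_cases hc : r0.contains c = true
    · have hmem : c ∈ r0.keys := (PySem.Dict.contains_iff_mem_keys r0 c).1 hc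
      have : (c, ([] : List (List (String × String)))) ∈ r0.items := by
        rw [hr0items]
        rw [hr0keys] at hmem
        exact List.mem_map.2 ⟨c, hmem, rfl⟩
      exact PySem.Dict.getD_of_mem_items r0 this hr0nodup []
    · exact PySem.Dict.getD_of_not_contains r0 [] (by simpa using hc)
  set fA := examples.foldl (fun d ex => d.modify (pvDget ex attr) [] (· ++ [ex])) r0 with hfA
  have hkA : fA.keys = PySem.Set.ofList m := by
    rw [hfA, PySem.Dict.keys_foldl_modify_key]
    rw [hr0keys, hLkeys, ← hm]
    exact pvUpdate_of_subset m _ (fun x hx => (PySem.Set.mem_ofList m x).2 hx)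
  have hnA : fA.keys.Nodup := by rw [hkA]; exact PySem.Set.nodup_ofList m
  have hgA : ∀ c, fA.getD c [] = examples.filter (fun ex => pvDget ex attr == c) := by
    intro c; rw [hfA, pvGetD_final]; rw [hr0getD]; simp
  rw [PySem.Dict.items_eq_map_keys fA hnA ([] : List (List (String × String)))]
  rw [hkA, ← PySem.List.dedup_eq_ofList]
  apply List.map_congr_left
  intro k _
  rw [hgA]
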